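-- pv_equiv track=rewrite | github.com/froma1976/openclaw-trading-skills | proyectos/analisis-mercados/scripts/source_ingest_free.py | build_openinsider_map
-- ===== SOURCE A (Python) =====
-- def build_openinsider_map(rows):
--     mp = {}
--     for r in rows:
--         s = r.get("symbol")
--         if not s:
--             continue
--         t = (r.get("type") or "").upper()
--         # En insider forms: P suele ser purchase
--         is_buy = ("P" in t) or ("BUY" in t)
--         cur = mp.get(s, {"insider_buys": 0, "insider_events": 0})
--         cur["insider_events"] += 1
--         if is_buy:
--             cur["insider_buys"] += 1
--         mp[s] = cur
--     return mp
-- ===== SOURCE B (Python) =====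
-- from collections import Counter
--
-- def build_openinsider_map(rows):
--     # Two grouping passes over the valid rows, then one assembly pass.
--     valid = []
--     for r in rows:
--         s = r.get("symbol")
--         if s:
--             valid.append((s, (r.get("type") or "").upper()))
--     events = Counter(s for s, _ in valid)
--     buys = Counter(s for s, t in valid if "P" in t or "BUY" in t)
--     return {s: {"insider_buys": buys[s], "insider_events": n}
--             for s, n in events.items()}
-- ===== Notes on version B (the rewrite author's own statement) =====
-- stated objective: alternative
-- what changed: A builds the result in one interleaved pass that mutates a per-symbol dict-of-dicts; B filters the valid rows once, builds two collections.Counter tables (all events, buy events) and assembles the per-symbol dicts in a final pass over the events counter.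
import Mathlib
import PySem

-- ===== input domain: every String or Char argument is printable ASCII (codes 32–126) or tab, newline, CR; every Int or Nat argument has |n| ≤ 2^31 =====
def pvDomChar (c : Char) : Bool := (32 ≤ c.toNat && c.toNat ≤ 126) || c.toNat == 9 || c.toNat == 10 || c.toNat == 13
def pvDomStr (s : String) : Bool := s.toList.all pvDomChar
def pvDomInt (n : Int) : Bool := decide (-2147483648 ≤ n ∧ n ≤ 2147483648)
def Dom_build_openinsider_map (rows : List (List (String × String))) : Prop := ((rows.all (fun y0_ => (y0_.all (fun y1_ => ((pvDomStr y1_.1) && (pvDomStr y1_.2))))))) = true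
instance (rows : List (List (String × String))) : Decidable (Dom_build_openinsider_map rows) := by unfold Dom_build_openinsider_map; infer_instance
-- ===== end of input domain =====

-- B replaces A's single interleaved dict-of-dicts accumulation by two Counter grouping
-- passes over the valid rows plus one assembly pass (objective: alternative decomposition).


-- ===== PORT A =====
-- literal transliteration of A: one fold over rows maintaining a dict of per-symbol dicts
def build_openinsider_map (rows : List (List (String × String))) : List (String × List (String × Int)) :=
  let mp : PySem.Dict String (PySem.Dict String Int) :=
    rows.foldl (fun mp r =>
      match (PySem.Dict.mk r).get? "symbol" with
      | none => mp
      | some s =>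
        if s = "" then mp
        else
          let t := PySem.Str.upper (((PySem.Dict.mk r).get? "type").getD "")
          let is_buy := PySem.Str.isIn "P" t || PySem.Str.isIn "BUY" t
          let cur := mp.getD s (PySem.Dict.mk [("insider_buys", 0), ("insider_events", 0)])
          let cur := cur.insert "insider_events" (cur.getD "insider_events" 0 + 1)
          let cur := if is_buy then cur.insert "insider_buys" (cur.getD "insider_buys" 0 + 1) else cur
          mp.insert s cur) PySem.Dict.empty
  mp.items.map (fun p => (p.1, p.2.items))

-- ===== PORT B =====
-- literal transliteration of B (Source B): collect valid (symbol, type) rows, two counters, assemble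
def build_openinsider_map_alt (rows : List (List (String × String))) : List (String × List (String × Int)) :=
  let valid : List (String × String) :=
    rows.foldl (fun acc r =>
      match (PySem.Dict.mk r).get? "symbol" with
      | none => acc
      | some s =>
        if s = "" then acc
        else acc ++ [(s, PySem.Str.upper (((PySem.Dict.mk r).get? "type").getD ""))]) []
  let events := PySem.Dict.counter (valid.map (·.1))
  let buys := PySem.Dict.counter
    ((valid.filter (fun p => PySem.Str.isIn "P" p.2 || PySem.Str.isIn "BUY" p.2)).map (·.1))
  events.items.map (fun p =>
    (p.1, [("insider_buys", buys.getD p.1 0), ("insider_events", p.2)]))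

-- ===== PRECONDITION & SPEC =====
def Spec_build_openinsider_map (rows : List (List (String × String))) (out : List (String × List (String × Int))) : Prop := out = build_openinsider_map_alt rows
instance (rows : List (List (String × String))) (out : List (String × List (String × Int))) : Decidable (Spec_build_openinsider_map rows out) := by unfold Spec_build_openinsider_map; infer_instance

-- ===== CLAIM (what is proved, stated in full; the proofs are below) =====
def Claim_equal_build_openinsider_map : Prop := ∀ (rows : List (List (String × String))), Dom_build_openinsider_map rows → Spec_build_openinsider_map rows (build_openinsider_map rows)

-- ===== LEMMAS AND PROOFS =====

-- the (symbol, uppercased type) pair a row contributes, none when the row is skipped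
def pvExtract (r : List (String × String)) : Option (String × String) :=
  match (PySem.Dict.mk r).get? "symbol" with
  | none => none
  | some s => if s = "" then none
      else some (s, PySem.Str.upper (((PySem.Dict.mk r).get? "type").getD ""))

def pvFlag (p : String × String) : Bool := PySem.Str.isIn "P" p.2 || PySem.Str.isIn "BUY" p.2

def pvPair (b e : Int) : PySem.Dict String Int := PySem.Dict.mk [("insider_buys", b), ("insider_events", e)]

def pvBump (cur : PySem.Dict String Int) (f : Bool) : PySem.Dict String Int :=
  let cur := cur.insert "insider_events" (cur.getD "insider_events" 0 + 1)
  if f then cur.insert "insider_buys" (cur.getD "insider_buys" 0 + 1) else cur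

-- A's loop body on an extracted pair
def pvStepA (mp : PySem.Dict String (PySem.Dict String Int)) (p : String × String) :
    PySem.Dict String (PySem.Dict String Int) :=
  mp.insert p.1 (pvBump (mp.getD p.1 (pvPair 0 0)) (pvFlag p))

lemma pvBump_pair (b e : Int) (f : Bool) :
    pvBump (pvPair b e) f = pvPair (b + if f then 1 else 0) (e + 1) := by
  cases f <;> simp [pvBump, pvPair, PySem.Dict.insert, PySem.Dict.getD, PySem.Dict.get?, PySem.Dict.contains]

-- A's row loop is the pvStepA loop over the extracted valid pairs
lemma pvFoldA (rows : List (List (String × String))) (mp : PySem.Dict String (PySem.Dict String Int)) :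
    rows.foldl (fun mp r =>
      match (PySem.Dict.mk r).get? "symbol" with
      | none => mp
      | some s =>
        if s = "" then mp
        else
          let t := PySem.Str.upper (((PySem.Dict.mk r).get? "type").getD "")
          let is_buy := PySem.Str.isIn "P" t || PySem.Str.isIn "BUY" t
          let cur := mp.getD s (PySem.Dict.mk [("insider_buys", 0), ("insider_events", 0)])
          let cur := cur.insert "insider_events" (cur.getD "insider_events" 0 + 1)
          let cur := if is_buy then cur.insert "insider_buys" (cur.getD "insider_buys" 0 + 1) else cur
          mp.insert s cur) mp
    = (rows.filterMap pvExtract).foldl pvStepA mp := by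
  rw [List.foldl_filterMap]
  apply PySem.List.foldl_congr_mem
  intro acc r _
  simp only [pvExtract]
  cases h : (PySem.Dict.mk r).get? "symbol" with
  | none => simp
  | some s => by_cases hs : s = "" <;> simp [hs, pvStepA, pvBump, pvFlag, pvPair]

-- B's valid-rows loop builds exactly the extracted list
lemma pvFoldB (rows : List (List (String × String))) (acc : List (String × String)) :
    rows.foldl (fun acc r =>
      match (PySem.Dict.mk r).get? "symbol" with
      | none => acc
      | some s =>
        if s = "" then acc
        else acc ++ [(s, PySem.Str.upper (((PySem.Dict.mk r).get? "type").getD ""))]) acc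
    = acc ++ rows.filterMap pvExtract := by
  have h := PySem.List.foldl_append_singleton_eq_self (l := rows.filterMap pvExtract) (acc := acc)
  rw [← h, List.foldl_filterMap]
  apply PySem.List.foldl_congr_mem
  intro acc r _
  simp only [pvExtract]
  cases h : (PySem.Dict.mk r).get? "symbol" with
  | none => simp
  | some s => by_cases hs : s = "" <;> simp [hs]

-- the per-symbol entry of A's dict is the pair of the two counts B takes from its counters
lemma pvGetA (ps : List (String × String)) (s : String) :
    (ps.foldl pvStepA PySem.Dict.empty).getD s (pvPair 0 0)
      = pvPair (((ps.filter pvFlag).map (·.1)).count s) ((ps.map (·.1)).count s) := by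
  induction ps using List.reverseRecOn generalizing s with
  | nil => rfl
  | append_singleton ps p ih =>
      rw [List.foldl_append, List.foldl_cons, List.foldl_nil]
      have hx : ∀ m : PySem.Dict String (PySem.Dict String Int),
          pvStepA m p = m.insert p.1 (pvBump (m.getD p.1 (pvPair 0 0)) (pvFlag p)) := fun _ => rfl
      rw [hx, ih p.1, pvBump_pair, PySem.Dict.getD_insert]
      by_cases hsp : s = p.1
      · subst hsp
        rw [if_pos rfl]
        by_cases hf : pvFlag p <;>
          simp [hf, pvPair, List.filter_append, List.map_append, List.count_append]
      · rw [if_neg hsp, ih s]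
        by_cases hf : pvFlag p <;>
          simp [hf, pvPair, List.filter_append, List.map_append, List.count_append,
            Ne.symm hsp]

-- A's dict lists each symbol once, in first-appearance order — the same order as B's counter
lemma pvKeysA (ps : List (String × String)) :
    (ps.foldl pvStepA PySem.Dict.empty).keys = PySem.Set.ofList (ps.map (·.1)) := by
  have h : ps.foldl pvStepA PySem.Dict.empty
      = ps.foldl (fun d x => d.insert x.1 (pvBump (d.getD x.1 (pvPair 0 0)) (pvFlag x)))
          PySem.Dict.empty := rfl
  rw [h, PySem.Dict.keys_foldl_insert_key]
  rfl

lemma pvNodupA (ps : List (String × String)) :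
    (ps.foldl pvStepA PySem.Dict.empty).keys.Nodup := by
  have h : ps.foldl pvStepA PySem.Dict.empty
      = ps.foldl (fun d x => d.insert x.1 (pvBump (d.getD x.1 (pvPair 0 0)) (pvFlag x)))
          PySem.Dict.empty := rfl
  rw [h]
  exact PySem.Dict.nodup_keys_foldl_insert_key _ _ _ _ PySem.Dict.nodup_keys_empty

-- ===== VERDICT (by name: the statement is the Claim_ definition above) =====
theorem build_openinsider_map_spec : Claim_equal_build_openinsider_map := by
  intro rows _
  unfold Spec_build_openinsider_map
  show build_openinsider_map rows = build_openinsider_map_alt rows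
  simp only [build_openinsider_map, build_openinsider_map_alt]
  rw [pvFoldA, pvFoldB, List.nil_append]
  set ps := rows.filterMap pvExtract with hps
  rw [PySem.Dict.items_eq_map_keys _ (pvNodupA ps) (pvPair 0 0), pvKeysA,
    PySem.Dict.items_counter, List.map_map, List.map_map]
  apply List.map_congr_left
  intro k _
  simp only [Function.comp_apply]
  rw [pvGetA]
  have hb : (PySem.Dict.counter ((ps.filter pvFlag).map (·.1))).getD k 0
      = (((ps.filter pvFlag).map (·.1)).count k : Int) := PySem.Dict.getD_counter _ _
  rw [show (fun p : String × String => PySem.Str.isIn "P" p.2 || PySem.Str.isIn "BUY" p.2)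
        = pvFlag from rfl, hb]
  rfl
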